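-- pv_equiv track=rewrite | github.com/Marten-Verbree/Challenge-Nine-Google-Kickstart | solution.py | func
-- ===== SOURCE A (Python) =====
-- def func(I,tc):
--     len_i = len(I)
--     digit = str(9 - (sum([int(i) for i in I]) % 9))
--     if digit == "9":
--         digit = '0'
--     allowed_indices = range(len_i+1)
--     for idx in allowed_indices:
--         if idx == 0:
--             if digit == "0":
--                 continue
--             if int(digit) >= int(I[idx]):
--                 continue
--             I_new = int(digit + I)
--         elif idx == len_i:
--
--             I_new = int(I + digit)
--         else:
--             if int(digit) >= int(I[idx]):
--                 continue
--             I_new = int(I[:idx]+digit+I[idx:])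
--         if I_new % 9 == 0:
--             break
--     return f"Case #{tc}: {I_new}"
-- ===== SOURCE B (Python) =====
-- def func(I, tc):
--     s = sum(int(c) for c in I)
--     d = str((9 - s % 9) % 9)
--     start = 1 if d == "0" else 0
--     best = min(int(I[:i] + d + I[i:]) for i in range(start, len(I) + 1))
--     return f"Case #{tc}: {best}"
-- ===== Notes on version B (the rewrite author's own statement) =====
-- stated objective: simpler
-- what changed: A scans positions left to right with per-position guards and an early break on the first divisible insertion; B computes the fill digit in closed form ((9 - digitsum%9) % 9), materialises every insertion candidate (skipping only position 0 for a zero fill digit) and returns the minimum — a generate-and-reduce pass instead of a guarded first-fit scan.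
import Mathlib
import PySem

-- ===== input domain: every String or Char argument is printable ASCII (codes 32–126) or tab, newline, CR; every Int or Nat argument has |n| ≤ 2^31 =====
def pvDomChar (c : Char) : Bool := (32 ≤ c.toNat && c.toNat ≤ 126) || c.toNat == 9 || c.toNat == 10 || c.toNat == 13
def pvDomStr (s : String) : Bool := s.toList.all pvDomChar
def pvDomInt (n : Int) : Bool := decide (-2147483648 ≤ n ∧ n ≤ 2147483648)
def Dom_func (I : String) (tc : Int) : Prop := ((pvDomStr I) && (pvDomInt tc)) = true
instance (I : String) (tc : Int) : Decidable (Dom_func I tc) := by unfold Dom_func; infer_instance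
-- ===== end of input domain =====

-- B replaces A's guarded first-fit scan by "build all insertion candidates, take the min" (simpler, not faster).

-- ===== PORT A =====
-- Hand-written port of Python's int(s), shared by both ports: exact whenever s is a
-- nonempty string of ASCII digits — the only strings either program feeds to int()
-- under Pre_func.  (The prelude's PySem.Int.ofStr? agrees there, but its digit parser
-- is private to the prelude, so the value facts the proof needs are proved about this
-- explicit fold instead.)
def dv (c : Char) : Int := (c.toNat : Int) - 48

def pyIntDigits (cs : List Char) : Int := cs.foldl (fun a c => 10 * a + dv c) 0

-- A's `for idx in range(len_i+1)` loop with `continue`/`break` as recursion.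
-- `0` on exhaustion stands for Python's NameError on the unassigned I_new (reachable
-- only for I = "", excluded by Pre_func); `cs.getD idx ' '` is I[idx] (always in range
-- when evaluated under Pre_func).
def funcLoop (cs : List Char) (digit : String) (n idx : Nat) : Int :=
  if _h : n < idx then 0
  else if idx = 0 then
    if digit == "0" then funcLoop cs digit n (idx + 1)
    else if pyIntDigits digit.toList ≥ pyIntDigits [cs.getD idx ' '] then
      funcLoop cs digit n (idx + 1)
    else
      let I_new := pyIntDigits (digit.toList ++ cs)
      if PySem.Int.mod I_new 9 == 0 then I_new else funcLoop cs digit n (idx + 1)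
  else if idx = n then
    -- I_new is assigned here; whether `if I_new % 9 == 0: break` fires or the loop just
    -- ends, the function returns exactly this I_new.
    pyIntDigits (cs ++ digit.toList)
  else
    if pyIntDigits digit.toList ≥ pyIntDigits [cs.getD idx ' '] then
      funcLoop cs digit n (idx + 1)
    else
      let I_new := pyIntDigits (PySem.List.slice cs none (some (idx : Int)) ++ digit.toList ++
        PySem.List.slice cs (some (idx : Int)) none)
      if PySem.Int.mod I_new 9 == 0 then I_new else funcLoop cs digit n (idx + 1)
  termination_by n + 1 - idx
  decreasing_by all_goals omega

def func (I : String) (tc : Int) : String :=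
  let cs := I.toList
  let len_i := cs.length
  let digit0 := PySem.Int.toStr (9 - PySem.Int.mod ((cs.map fun c => pyIntDigits [c]).sum) 9)
  let digit := if digit0 == "9" then "0" else digit0
  let I_new := funcLoop cs digit len_i 0
  "Case #" ++ PySem.Int.toStr tc ++ ": " ++ PySem.Int.toStr I_new

-- ===== PORT B =====
def func_alt (I : String) (tc : Int) : String :=
  let cs := I.toList
  let d := PySem.Int.toStr (PySem.Int.mod (9 - PySem.Int.mod ((cs.map fun c => pyIntDigits [c]).sum) 9) 9)
  let start : Int := if d == "0" then 1 else 0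
  let cands := (PySem.List.pyRange start ((cs.length : Int) + 1) 1).map fun i =>
    pyIntDigits (PySem.List.slice cs none (some i) ++ d.toList ++ PySem.List.slice cs (some i) none)
  -- min() raises ValueError on an empty sequence: only for I = "", excluded by Pre_func
  let best := (PySem.List.min? cands (fun x => x)).getD 0
  "Case #" ++ PySem.Int.toStr tc ++ ": " ++ PySem.Int.toStr best

-- ===== PRECONDITION & SPEC =====
-- Pre_func: I is a nonempty string of ASCII digits — exactly the inputs on which the
-- Python A returns normally (on any other character int() raises ValueError, and on
-- I = "" the loop ends with I_new unassigned and A raises NameError).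
def Pre_func (I : String) (tc : Int) : Prop :=
  I.toList ≠ [] ∧ (I.toList.all fun c => 48 ≤ c.toNat && c.toNat ≤ 57) = true
instance (I : String) (tc : Int) : Decidable (Pre_func I tc) := by unfold Pre_func; infer_instance

def pvWitness_func : String × Int := ("1892", 7)

def Spec_func (I : String) (tc : Int) (out : String) : Prop := out = func_alt I tc
instance (I : String) (tc : Int) (out : String) : Decidable (Spec_func I tc out) := by
  unfold Spec_func; infer_instance

-- ===== CLAIM (what is proved, stated in full; the proofs are below) =====
def Claim_equal_func : Prop := ∀ (I : String) (tc : Int), Dom_func I tc → Pre_func I tc → Spec_func I tc (func I tc)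

-- ===== LEMMAS AND PROOFS =====

-- all characters are ASCII digits
def Digits (cs : List Char) : Prop := ∀ c ∈ cs, 48 ≤ c.toNat ∧ c.toNat ≤ 57

-- the string built by inserting the fill digit d at position i
def cand (cs : List Char) (d : Char) (i : Nat) : List Char := cs.take i ++ d :: cs.drop i

-- A's guard at position i: the insertion there is taken (position 0 additionally
-- requires a nonzero fill digit)
def good (cs : List Char) (D : Int) (i : Nat) : Bool :=
  (decide (i ≠ 0) || decide (D ≠ 0)) && decide (D < dv (cs.getD i ' '))

-- the position at which A's scan assigns the I_new it returns
def scanPos (cs : List Char) (D : Int) (n idx : Nat) : Nat :=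
  if n ≤ idx then n
  else if good cs D idx then idx
  else scanPos cs D n (idx + 1)
  termination_by n - idx
  decreasing_by omega

theorem val_single (c : Char) : pyIntDigits [c] = dv c := by
  simp [pyIntDigits]

theorem foldl_val (cs : List Char) (a : Int) :
    cs.foldl (fun a c => 10 * a + dv c) a = a * 10 ^ cs.length + pyIntDigits cs := by
  induction cs generalizing a with
  | nil => simp [pyIntDigits]
  | cons c t ih =>
    simp only [List.foldl_cons, List.length_cons, pyIntDigits]
    rw [ih, ih]
    ring

theorem val_cons (c : Char) (t : List Char) :
    pyIntDigits (c :: t) = dv c * 10 ^ t.length + pyIntDigits t := by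
  have h := foldl_val t (10 * 0 + dv c)
  simpa [pyIntDigits] using h

theorem val_append (xs ys : List Char) :
    pyIntDigits (xs ++ ys) = pyIntDigits xs * 10 ^ ys.length + pyIntDigits ys := by
  simp only [pyIntDigits, List.foldl_append]
  rw [foldl_val]
  rfl

theorem val_nonneg (cs : List Char) (h : Digits cs) : 0 ≤ pyIntDigits cs := by
  induction cs with
  | nil => simp [pyIntDigits]
  | cons c t ih =>
    have hc := h c (List.mem_cons_self ..)
    have ht := ih (fun x hx => h x (List.mem_cons_of_mem _ hx))
    have h10 : (0:Int) ≤ 10 ^ t.length := by positivity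
    rw [val_cons]
    have : (0:Int) ≤ dv c := by unfold dv; omega
    nlinarith

theorem val_lt (cs : List Char) (h : Digits cs) : pyIntDigits cs < 10 ^ cs.length := by
  induction cs with
  | nil => simp [pyIntDigits]
  | cons c t ih =>
    have hc := h c (List.mem_cons_self ..)
    have ht := ih (fun x hx => h x (List.mem_cons_of_mem _ hx))
    have h10 : (0:Int) ≤ 10 ^ t.length := by positivity
    rw [val_cons]
    have h9 : dv c ≤ 9 := by unfold dv; omega
    have : dv c * 10 ^ t.length ≤ 9 * 10 ^ t.length := by nlinarith
    calc dv c * 10 ^ t.length + pyIntDigits t < dv c * 10 ^ t.length + 10 ^ t.length := by omega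
    _ ≤ 9 * 10 ^ t.length + 10 ^ t.length := by omega
    _ = 10 ^ (t.length + 1) := by ring
    _ = 10 ^ (c :: t).length := by rw [List.length_cons]

theorem val_modeq (cs : List Char) : pyIntDigits cs ≡ (cs.map dv).sum [ZMOD 9] := by
  induction cs with
  | nil => simp [pyIntDigits]
  | cons c t ih =>
    rw [val_cons, List.map_cons, List.sum_cons]
    have hpow : (10:Int) ^ t.length ≡ 1 ^ t.length [ZMOD 9] :=
      Int.ModEq.pow _ (by decide)
    have h1 : dv c * 10 ^ t.length ≡ dv c * 1 [ZMOD 9] :=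
      Int.ModEq.mul_left _ (by simpa using hpow)
    simpa [mul_one] using h1.add ih

theorem digit_char (D : Int) (h0 : 0 ≤ D) (h8 : D ≤ 8) :
    ∃ c : Char, (PySem.Int.toStr D).toList = [c] ∧ dv c = D ∧ 48 ≤ c.toNat ∧ c.toNat ≤ 57 ∧
      ((PySem.Int.toStr D == "0") = (D == 0)) := by
  interval_cases D
  · exact ⟨'0', by decide⟩
  · exact ⟨'1', by decide⟩
  · exact ⟨'2', by decide⟩
  · exact ⟨'3', by decide⟩
  · exact ⟨'4', by decide⟩
  · exact ⟨'5', by decide⟩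
  · exact ⟨'6', by decide⟩
  · exact ⟨'7', by decide⟩
  · exact ⟨'8', by decide⟩

-- the two ports compute the same fill-digit string
theorem digits_eq (s : Int) :
    (if PySem.Int.toStr (9 - PySem.Int.mod s 9) == "9" then "0"
     else PySem.Int.toStr (9 - PySem.Int.mod s 9)) =
    PySem.Int.toStr (PySem.Int.mod (9 - PySem.Int.mod s 9) 9) := by
  have h0 : 0 ≤ PySem.Int.mod s 9 := PySem.Int.mod_nonneg _ (by norm_num)
  have h9 : PySem.Int.mod s 9 < 9 := PySem.Int.mod_lt _ (by norm_num)
  set r := PySem.Int.mod s 9 with hr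
  clear_value r
  interval_cases r <;> decide

theorem good_iff (cs : List Char) (D : Int) (i : Nat) :
    good cs D i = true ↔ (i ≠ 0 ∨ D ≠ 0) ∧ D < dv (cs.getD i ' ') := by
  simp only [good, Bool.and_eq_true, Bool.or_eq_true, decide_eq_true_eq]

theorem scanPos_spec (cs : List Char) (D : Int) (n : Nat) : ∀ idx, idx ≤ n →
    idx ≤ scanPos cs D n idx ∧ scanPos cs D n idx ≤ n ∧
    (∀ j, idx ≤ j → j < scanPos cs D n idx → good cs D j = false) ∧
    (scanPos cs D n idx < n → good cs D (scanPos cs D n idx) = true) := by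
  suffices h : ∀ k idx, idx ≤ n → n - idx ≤ k →
      idx ≤ scanPos cs D n idx ∧ scanPos cs D n idx ≤ n ∧
      (∀ j, idx ≤ j → j < scanPos cs D n idx → good cs D j = false) ∧
      (scanPos cs D n idx < n → good cs D (scanPos cs D n idx) = true) by
    intro idx hidx; exact h (n - idx) idx hidx le_rfl
  intro k
  induction k with
  | zero =>
    intro idx hidx hk
    have : n = idx := by omega
    rw [scanPos, if_pos (by omega)]
    refine ⟨by omega, le_rfl, fun j h1 h2 => by omega, fun h => by omega⟩
  | succ k ih =>
    intro idx hidx hk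
    rw [scanPos]
    by_cases hni : n ≤ idx
    · rw [if_pos hni]
      refine ⟨by omega, le_rfl, fun j h1 h2 => by omega, fun h => by omega⟩
    · rw [if_neg hni]
      by_cases hg : good cs D idx = true
      · rw [if_pos hg]
        exact ⟨le_rfl, by omega, fun j h1 h2 => by omega, fun _ => hg⟩
      · rw [if_neg hg]
        obtain ⟨a, b, c, d⟩ := ih (idx + 1) (by omega) (by omega)
        refine ⟨by omega, b, fun j h1 h2 => ?_, d⟩
        rcases Nat.eq_or_lt_of_le h1 with h | h
        · simpa [← h] using hg
        · exact c j h h2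

theorem funcLoop_eq (cs : List Char) (dc : Char) (D : Int) (n : Nat)
    (hn : n = cs.length) (hne : 1 ≤ n) (hdvD : dv dc = D)
    (hmodall : ∀ i, i ≤ n → PySem.Int.mod (pyIntDigits (cand cs dc i)) 9 = 0)
    (hstr : (PySem.Int.toStr D).toList = [dc])
    (h0 : (PySem.Int.toStr D == "0") = (D == 0)) :
    ∀ idx, idx ≤ n →
      funcLoop cs (PySem.Int.toStr D) n idx = pyIntDigits (cand cs dc (scanPos cs D n idx)) := by
  suffices h : ∀ k idx, idx ≤ n → n - idx ≤ k →
      funcLoop cs (PySem.Int.toStr D) n idx = pyIntDigits (cand cs dc (scanPos cs D n idx)) by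
    intro idx hidx; exact h (n - idx) idx hidx le_rfl
  intro k
  induction k with
  | zero =>
    intro idx hidx hk
    have he : idx = n := by omega
    subst he
    rw [funcLoop, dif_neg (by omega), if_neg (by omega), if_pos rfl, hstr]
    rw [scanPos, if_pos le_rfl]
    simp [cand, hn]
  | succ k ih =>
    intro idx hidx hk
    rcases Nat.eq_or_lt_of_le hidx with he | hlt
    · subst he
      rw [funcLoop, dif_neg (by omega), if_neg (by omega), if_pos rfl, hstr]
      rw [scanPos, if_pos le_rfl]
      simp [cand, hn]
    · have hsp : scanPos cs D n idx =
          if good cs D idx = true then idx else scanPos cs D n (idx + 1) := by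
        rw [scanPos, if_neg (by omega)]
      rw [funcLoop, dif_neg (by omega)]
      by_cases hz : idx = 0
      · subst hz
        rw [if_pos rfl, h0]
        by_cases hD : D = 0
        · rw [if_pos (by simp [hD]), hsp, if_neg (by rw [Bool.not_eq_true, Bool.eq_false_iff, Ne, good_iff]; omega)]
          exact ih _ (by omega) (by omega)
        · rw [if_neg (by simp [hD]), hstr, val_single, val_single, hdvD]
          by_cases hG : dv (cs.getD 0 ' ') ≤ D
          · rw [if_pos hG, hsp, if_neg (by rw [Bool.not_eq_true, Bool.eq_false_iff, Ne, good_iff]; omega)]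
            exact ih _ (by omega) (by omega)
          · rw [if_neg hG]
            have hm := hmodall 0 (by omega)
            have hc0 : cand cs dc 0 = dc :: cs := by simp [cand]
            rw [hc0] at hm
            simp only [List.singleton_append]
            rw [if_pos (beq_iff_eq.2 hm), hsp, if_pos (by rw [good_iff]; omega), hc0]
      · rw [if_neg hz, if_neg (by omega), hstr, val_single, val_single, hdvD]
        by_cases hG : dv (cs.getD idx ' ') ≤ D
        · rw [if_pos hG, hsp, if_neg (by rw [Bool.not_eq_true, Bool.eq_false_iff, Ne, good_iff]; omega)]
          exact ih _ (by omega) (by omega)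
        · rw [if_neg hG]
          have hm := hmodall idx (by omega)
          have hcand : cand cs dc idx = cs.take idx ++ [dc] ++ cs.drop idx := by
            simp [cand]
          rw [hcand] at hm
          rw [PySem.List.slice_to_natCast, PySem.List.slice_from_natCast,
            if_pos (beq_iff_eq.2 hm), hsp, if_pos (by rw [good_iff]; omega), hcand]

theorem val_head_le (a b : Char) (t1 t2 : List Char) (hlen : t1.length = t2.length)
    (hab : dv a < dv b) (ht1 : pyIntDigits t1 < 10 ^ t1.length) (ht2 : 0 ≤ pyIntDigits t2) :
    pyIntDigits (a :: t1) ≤ pyIntDigits (b :: t2) := by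
  rw [val_cons, val_cons, ← hlen]
  nlinarith [pow_nonneg (by norm_num : (0:Int) ≤ 10) t1.length]

theorem val_cand_adjacent (cs : List Char) (dc : Char) (i : Nat) (hi : i < cs.length)
    (hle : dv (cs.getD i ' ') ≤ dv dc) :
    pyIntDigits (cand cs dc (i + 1)) ≤ pyIntDigits (cand cs dc i) := by
  rw [List.getD_eq_getElem cs ' ' hi] at hle
  have hdrop : cs.drop i = cs[i] :: cs.drop (i + 1) := List.drop_eq_getElem_cons hi
  have htake : cs.take (i + 1) = cs.take i ++ [cs[i]] := by
    rw [List.take_add_one, List.getElem?_eq_getElem hi]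
    rfl
  unfold cand
  rw [htake, hdrop, List.append_assoc, List.singleton_append, val_append, val_append,
    val_cons, val_cons, val_cons, val_cons]
  simp only [List.length_cons]
  have hp : (10:Int) ^ ((cs.drop (i + 1)).length + 1) = 10 ^ (cs.drop (i + 1)).length * 10 :=
    pow_succ 10 _
  nlinarith [pow_nonneg (by norm_num : (0:Int) ≤ 10) (cs.drop (i + 1)).length]

theorem val_cand_after (cs : List Char) (dc : Char) (p i : Nat) (hp : p < cs.length)
    (hpi : p < i) (hi : i ≤ cs.length)
    (hdig : Digits cs) (hdc : 48 ≤ dc.toNat ∧ dc.toNat ≤ 57)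
    (hlt : dv dc < dv (cs.getD p ' ')) :
    pyIntDigits (cand cs dc p) ≤ pyIntDigits (cand cs dc i) := by
  rw [List.getD_eq_getElem cs ' ' hp] at hlt
  obtain ⟨m, rfl⟩ : ∃ m, i = p + (m + 1) := ⟨i - p - 1, by omega⟩
  have hdropp : cs.drop p = cs[p] :: cs.drop (p + 1) := List.drop_eq_getElem_cons hp
  have htake : cs.take (p + (m + 1)) = cs.take p ++ (cs[p] :: (cs.drop (p + 1)).take m) := by
    rw [List.take_add, hdropp]
    rfl
  unfold cand
  rw [htake, hdropp, List.append_assoc, List.cons_append]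
  rw [val_append, val_append]
  have hlen1 : (dc :: cs[p] :: cs.drop (p + 1)).length =
      (cs[p] :: ((cs.drop (p + 1)).take m ++ dc :: cs.drop (p + (m + 1)))).length := by
    simp only [List.length_cons, List.length_append, List.length_take, List.length_drop]
    omega
  rw [← hlen1]
  apply add_le_add le_rfl
  apply val_head_le
  · simp only [List.length_cons, List.length_append, List.length_take, List.length_drop]
    omega
  · exact hlt
  · refine val_lt _ (fun c hc => hdig c ?_)
    rw [← hdropp] at hc
    exact List.mem_of_mem_drop hc
  · apply val_nonneg
    intro c hc
    rcases List.mem_append.1 hc with h | h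
    · exact hdig c (List.mem_of_mem_drop (List.mem_of_mem_take h))
    · rcases List.mem_cons.1 h with h | h
      · exact h ▸ hdc
      · exact hdig c (List.mem_of_mem_drop h)

-- the scan position minimises the candidate value over all admissible insertion points
theorem val_cand_min (cs : List Char) (dc : Char) (D : Int) (n start' : Nat)
    (hn : n = cs.length) (hne : 1 ≤ n) (hdig : Digits cs)
    (hdc : 48 ≤ dc.toNat ∧ dc.toNat ≤ 57) (hdvD : dv dc = D)
    (hstart : start' = if D = 0 then 1 else 0) :
    ∀ j, start' ≤ j → j ≤ n →
      pyIntDigits (cand cs dc (scanPos cs D n start')) ≤ pyIntDigits (cand cs dc j) := by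
  have hsn : start' ≤ n := by rw [hstart]; split <;> omega
  obtain ⟨h1, h2, h3, h4⟩ := scanPos_spec cs D n start' hsn
  set p := scanPos cs D n start' with hp
  have below : ∀ m j, start' ≤ j → j ≤ p → p - j ≤ m →
      pyIntDigits (cand cs dc p) ≤ pyIntDigits (cand cs dc j) := by
    intro m
    induction m with
    | zero =>
      intro j hj1 hj2 hj3
      have he : j = p := by omega
      subst he; exact le_rfl
    | succ m ih =>
      intro j hj1 hj2 hj3
      rcases Nat.eq_or_lt_of_le hj2 with he | hlt2
      · subst he; exact le_rfl
      · have hgf : good cs D j = false := h3 j hj1 hlt2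
        have hnot : ¬ ((j ≠ 0 ∨ D ≠ 0) ∧ D < dv (cs.getD j ' ')) := by
          rw [← good_iff, hgf]; simp
        have hor : j ≠ 0 ∨ D ≠ 0 := by
          rcases Nat.eq_zero_or_pos j with hj0 | hj0
          · right; intro hD0; rw [hstart, if_pos hD0] at hj1; omega
          · left; omega
        have hle : dv (cs.getD j ' ') ≤ dv dc := by rw [hdvD]; omega
        calc pyIntDigits (cand cs dc p) ≤ pyIntDigits (cand cs dc (j + 1)) :=
              ih (j + 1) (by omega) (by omega) (by omega)
          _ ≤ pyIntDigits (cand cs dc j) := val_cand_adjacent cs dc j (by omega) hle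
  intro j hj1 hj2
  rcases Nat.lt_or_ge p j with hlt | hge
  · have hplt : dv dc < dv (cs.getD p ' ') := hdvD ▸ ((good_iff cs D p).1 (h4 (by omega))).2
    exact val_cand_after cs dc p j (by omega) hlt (by omega) hdig hdc hplt
  · exact below (p - j) j hj1 hge le_rfl

-- ===== VERDICT (by name: the statement is the Claim_ definition above) =====
theorem func_spec : Claim_equal_func := by
  intro I tc _hdom hpre
  obtain ⟨hne, hall⟩ := hpre
  have hdigs : ∀ c ∈ I.toList, 48 ≤ c.toNat ∧ c.toNat ≤ 57 := by
    intro c hc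
    simpa using List.all_eq_true.1 hall c hc
  unfold Spec_func func func_alt
  dsimp only
  set cs := I.toList with hcs
  set S : Int := (cs.map fun c => pyIntDigits [c]).sum with hS
  rw [digits_eq S]
  set D : Int := PySem.Int.mod (9 - PySem.Int.mod S 9) 9 with hD
  have hmapdv : (cs.map fun c => pyIntDigits [c]) = cs.map dv := by
    simp [val_single]
  have hS0 : 0 ≤ S := by
    rw [hS, hmapdv]
    apply List.sum_nonneg
    intro x hx
    obtain ⟨c, hc, rfl⟩ := List.mem_map.1 hx
    have := hdigs c hc
    unfold dv; omega
  have hD0 : 0 ≤ D := hD ▸ PySem.Int.mod_nonneg _ (by norm_num)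
  have hD8 : D ≤ 8 := by
    have h9 := PySem.Int.mod_lt (9 - PySem.Int.mod S 9) (by norm_num : (0:Int) < 9)
    omega
  obtain ⟨dc, hstr, hdvD, hdc1, hdc2, h0⟩ := digit_char D hD0 hD8
  have hn1 : 1 ≤ cs.length := List.length_pos_iff.2 hne
  have h9dvd : (9:Int) ∣ (S + D) := by
    have h1 : PySem.Int.mod S 9 = S % 9 := PySem.Int.mod_eq_emod_of_pos (by norm_num)
    have h2 : PySem.Int.mod (9 - PySem.Int.mod S 9) 9 = (9 - S % 9) % 9 := by
      rw [h1, PySem.Int.mod_eq_emod_of_pos (by norm_num)]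
    rw [hD, h2]
    omega
  have hmodall : ∀ i, i ≤ cs.length → PySem.Int.mod (pyIntDigits (cand cs dc i)) 9 = 0 := by
    intro i hi
    rw [PySem.Int.mod_eq_zero_iff_dvd]
    have hsplit : (List.map dv (cs.take i)).sum + (List.map dv (cs.drop i)).sum =
        (List.map dv cs).sum := by
      rw [← List.sum_append, ← List.map_append, List.take_append_drop]
    have hsum : ((cand cs dc i).map dv).sum = S + D := by
      unfold cand
      rw [List.map_append, List.map_cons, List.sum_append, List.sum_cons, hdvD, hS, hmapdv]
      omega
    have hmq := val_modeq (cand cs dc i)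
    rw [hsum] at hmq
    have hmq' : pyIntDigits (cand cs dc i) % 9 = (S + D) % 9 := hmq
    omega
  set start' : Nat := if D = 0 then 1 else 0 with hstart
  have hstartI : (if (PySem.Int.toStr D == "0") = true then (1:Int) else 0) = ((start' : Nat) : Int) := by
    rw [h0, hstart]
    by_cases hD0' : D = 0 <;> simp [hD0']
  rw [hstartI]
  have hloop := funcLoop_eq cs dc D cs.length rfl hn1 hdvD hmodall hstr h0 0 (by omega)
  have hsn' : start' ≤ 1 := by rw [hstart]; split <;> omega
  have hscan0 : scanPos cs D cs.length 0 = scanPos cs D cs.length start' := by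
    by_cases hD0' : D = 0
    · rw [hstart, if_pos hD0', scanPos, if_neg (by omega),
        if_neg (by simp only [good_iff]; omega)]
    · rw [hstart, if_neg hD0']
  set p := scanPos cs D cs.length start' with hpdef
  obtain ⟨hp1, hp2, _, _⟩ := scanPos_spec cs D cs.length start' (by omega)
  have hmin := val_cand_min cs dc D cs.length start' rfl hn1 hdigs ⟨hdc1, hdc2⟩ hdvD hstart
  have hfj : ∀ j : Nat,
      pyIntDigits (PySem.List.slice cs none (some ((j : Nat) : Int)) ++ (PySem.Int.toStr D).toList ++
        PySem.List.slice cs (some ((j : Nat) : Int)) none) = pyIntDigits (cand cs dc j) := by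
    intro j
    rw [PySem.List.slice_to_natCast, PySem.List.slice_from_natCast, hstr]
    unfold cand
    rw [List.append_assoc, List.singleton_append]
  set L := List.map
      (fun i => pyIntDigits
        (PySem.List.slice cs none (some i) ++ (PySem.Int.toStr D).toList ++ PySem.List.slice cs (some i) none))
      (PySem.List.pyRange ((start' : Nat) : Int) ((cs.length : Int) + 1) 1) with hL
  have hmemp : pyIntDigits (cand cs dc p) ∈ L := by
    rw [hL]
    refine List.mem_map.2 ⟨((p : Nat) : Int), ?_, hfj p⟩
    refine PySem.List.mem_pyRange_one.2 ⟨by exact_mod_cast hp1, by exact_mod_cast Nat.lt_succ_of_le hp2⟩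
  obtain ⟨m, hm⟩ : ∃ m, PySem.List.min? L (fun x => x) = some m := by
    cases hmm : PySem.List.min? L (fun x => x) with
    | none =>
      have hLnil : L = [] := (PySem.List.min?_eq_none_iff _ _).1 hmm
      rw [hLnil] at hmemp
      exact absurd hmemp (List.not_mem_nil)
    | some m => exact ⟨m, rfl⟩
  have hmle := PySem.List.min?_isMin hm
  have hmmem := PySem.List.min?_mem hm
  have hle1 : m ≤ pyIntDigits (cand cs dc p) := by simpa using hmle _ hmemp
  have hle2 : pyIntDigits (cand cs dc p) ≤ m := by
    rw [hL] at hmmem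
    obtain ⟨i, hiL, hieq⟩ := List.mem_map.1 hmmem
    obtain ⟨hia, hib⟩ := PySem.List.mem_pyRange_one.1 hiL
    have hi0 : 0 ≤ i := le_trans (Int.natCast_nonneg _) hia
    lift i to Nat using hi0 with j
    rw [← hieq, hfj j]
    exact hmin j (by exact_mod_cast hia) (by omega)
  have hbest : (PySem.List.min? L (fun x => x)).getD 0 = pyIntDigits (cand cs dc p) := by
    rw [hm]
    simpa using le_antisymm hle1 hle2
  rw [hloop, hscan0, hbest]
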